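-- pv_equiv track=rewrite | github.com/nativ3ai/H1DR4-tools | staking-protocol-hc.py | calculate_selling_pressure_timeline
-- ===== SOURCE A (Python) =====
-- from typing import List, Dict, Optional, Tuple
--
-- def calculate_selling_pressure_timeline(unstake_events: List[Dict]) -> List[Dict]:
--     """Calculates selling pressure timeline"""
--     pressure_by_day = {}
--
--     for event in unstake_events:
--         days_remaining = event.get('days_remaining', 14)
--         estimated_amount = event.get('estimated_amount', 0)
--
--         if 0 <= days_remaining <= 14:
--             if days_remaining not in pressure_by_day:
--                 pressure_by_day[days_remaining] = {
--                     "day": days_remaining,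
--                     "amount": 0,
--                     "count": 0
--                 }
--
--             pressure_by_day[days_remaining]["amount"] += estimated_amount
--             pressure_by_day[days_remaining]["count"] += 1
--
--     return sorted(pressure_by_day.values(), key=lambda x: x['day'])
-- ===== SOURCE B (Python) =====
-- def calculate_selling_pressure_timeline(unstake_events):
--     """Calculates selling pressure timeline"""
--     timeline = []
--     for day in range(0, 15):
--         amount = 0
--         count = 0
--         for event in unstake_events:
--             if event.get('days_remaining', 14) == day:
--                 amount += event.get('estimated_amount', 0)
--                 count += 1
--         if count != 0:
--             timeline.append({"day": day, "amount": amount, "count": count})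
--     return timeline
-- ===== Notes on version B (the rewrite author's own statement) =====
-- stated objective: alternative
-- what changed: Replaced the dict-accumulate-then-sort-values algorithm by a fixed-range bucket sweep: for each day 0..14 a direct scan sums amounts and counts events, emitting buckets in ascending day order, so no dict and no sort are needed.
import Mathlib
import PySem

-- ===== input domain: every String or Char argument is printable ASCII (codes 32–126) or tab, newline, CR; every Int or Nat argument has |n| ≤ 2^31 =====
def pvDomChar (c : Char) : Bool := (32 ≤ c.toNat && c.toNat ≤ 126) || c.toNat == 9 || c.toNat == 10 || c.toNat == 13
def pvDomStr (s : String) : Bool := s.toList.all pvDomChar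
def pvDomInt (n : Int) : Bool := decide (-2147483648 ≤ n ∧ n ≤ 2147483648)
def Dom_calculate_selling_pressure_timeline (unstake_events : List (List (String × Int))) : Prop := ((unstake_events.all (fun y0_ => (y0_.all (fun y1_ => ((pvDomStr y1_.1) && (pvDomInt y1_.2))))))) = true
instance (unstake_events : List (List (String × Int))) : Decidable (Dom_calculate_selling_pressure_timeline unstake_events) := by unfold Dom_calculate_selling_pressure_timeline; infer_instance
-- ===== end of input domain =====

-- B replaces A's dict-accumulate-then-sort-values algorithm by a fixed-range sweep over the days
-- 0..14 (one scan per day, buckets emitted already in ascending order); objective: alternative.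

-- ===== PORT A =====
-- the body of A's 'for event in unstake_events' loop; inner dicts are PySem.Dict String Int
-- (the modify defaults are never used: the key is always present at those statements)
def pvAStep (pressure_by_day : PySem.Dict Int (PySem.Dict String Int))
    (event : List (String × Int)) : PySem.Dict Int (PySem.Dict String Int) :=
  let days_remaining := PySem.Dict.getD (PySem.Dict.mk event) "days_remaining" 14
  let estimated_amount := PySem.Dict.getD (PySem.Dict.mk event) "estimated_amount" 0
  if 0 ≤ days_remaining ∧ days_remaining ≤ 14 then
    -- if days_remaining not in pressure_by_day: insert the zero entry
    let d1 := if ¬ (pressure_by_day.contains days_remaining) then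
        pressure_by_day.insert days_remaining
          (PySem.Dict.mk [("day", days_remaining), ("amount", 0), ("count", 0)])
      else pressure_by_day
    -- pressure_by_day[days_remaining]["amount"] += estimated_amount
    let d2 := d1.modify days_remaining (PySem.Dict.mk [])
        (fun v => v.modify "amount" 0 (· + estimated_amount))
    -- pressure_by_day[days_remaining]["count"] += 1
    d2.modify days_remaining (PySem.Dict.mk []) (fun v => v.modify "count" 0 (· + 1))
  else pressure_by_day

def calculate_selling_pressure_timeline (unstake_events : List (List (String × Int))) : List (List (String × Int)) :=
  let pressure_by_day := unstake_events.foldl pvAStep PySem.Dict.empty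
  -- sorted(pressure_by_day.values(), key=lambda x: x['day']); inner dicts rendered as assoc lists
  ((PySem.List.sorted pressure_by_day.values (fun x => PySem.Dict.getD x "day" 0)).map
    (fun v => v.items))

-- ===== PORT B =====
-- the body of B's inner 'for event in unstake_events' loop, accumulating (amount, count)
def pvBInner (day : Int) (ac : Int × Int) (event : List (String × Int)) : Int × Int :=
  if PySem.Dict.getD (PySem.Dict.mk event) "days_remaining" 14 = day then
    (ac.1 + PySem.Dict.getD (PySem.Dict.mk event) "estimated_amount" 0, ac.2 + 1)
  else ac

def calculate_selling_pressure_timeline_alt (unstake_events : List (List (String × Int))) : List (List (String × Int)) :=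
  (PySem.List.pyRange 0 15 1).foldl (fun timeline day =>
    let ac := unstake_events.foldl (pvBInner day) (0, 0)
    if ac.2 ≠ 0 then timeline ++ [[("day", day), ("amount", ac.1), ("count", ac.2)]]
    else timeline) []

-- ===== PRECONDITION & SPEC =====
def Spec_calculate_selling_pressure_timeline (unstake_events : List (List (String × Int))) (out : List (List (String × Int))) : Prop := out = calculate_selling_pressure_timeline_alt unstake_events
instance (unstake_events : List (List (String × Int))) (out : List (List (String × Int))) : Decidable (Spec_calculate_selling_pressure_timeline unstake_events out) := by unfold Spec_calculate_selling_pressure_timeline; infer_instance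

-- ===== CLAIM (what is proved, stated in full; the proofs are below) =====
def Claim_equal_calculate_selling_pressure_timeline : Prop := ∀ (unstake_events : List (List (String × Int))), Dom_calculate_selling_pressure_timeline unstake_events → Spec_calculate_selling_pressure_timeline unstake_events (calculate_selling_pressure_timeline unstake_events)

-- ===== LEMMAS AND PROOFS =====

-- event's day / amount with A's defaults
def pvDr (e : List (String × Int)) : Int := PySem.Dict.getD (PySem.Dict.mk e) "days_remaining" 14
def pvEa (e : List (String × Int)) : Int := PySem.Dict.getD (PySem.Dict.mk e) "estimated_amount" 0
-- the valid days of the events, in order, with multiplicity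
def pvVDays (es : List (List (String × Int))) : List Int :=
  (es.map pvDr).filter (fun d => decide (0 ≤ d) && decide (d ≤ 14))
-- total amount / number of events of a given day
def pvS (es : List (List (String × Int))) (d : Int) : Int :=
  ((es.filter (fun e => pvDr e == d)).map pvEa).sum
def pvC (es : List (List (String × Int))) (d : Int) : Int :=
  ((es.filter (fun e => pvDr e == d)).length : Int)
def pvEntry (d a c : Int) : PySem.Dict String Int :=
  PySem.Dict.mk [("day", d), ("amount", a), ("count", c)]

theorem pvEntry_modify_amount (d a c x : Int) :
    (pvEntry d a c).modify "amount" 0 (· + x) = pvEntry d (a + x) c := rfl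

theorem pvEntry_modify_count (d a c x : Int) :
    (pvEntry d a c).modify "count" 0 (· + x) = pvEntry d a (c + x) := rfl

theorem pvEntry_getD_day (d a c : Int) : PySem.Dict.getD (pvEntry d a c) "day" 0 = d := rfl

theorem pvVDays_append (es : List (List (String × Int))) (e : List (String × Int)) :
    pvVDays (es ++ [e]) =
      pvVDays es ++ (if 0 ≤ pvDr e ∧ pvDr e ≤ 14 then [pvDr e] else []) := by
  simp [pvVDays, List.filter_append]
  split_ifs with h
  · simp [List.filter, h.1, h.2]
  · rcases (not_and_or.mp h) with h' | h' <;> simp [List.filter, h']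

theorem pvS_append (es : List (List (String × Int))) (e : List (String × Int)) (d : Int) :
    pvS (es ++ [e]) d = pvS es d + (if pvDr e = d then pvEa e else 0) := by
  by_cases h : pvDr e = d <;> simp [pvS, List.filter_append, List.filter_cons, h]

theorem pvC_append (es : List (List (String × Int))) (e : List (String × Int)) (d : Int) :
    pvC (es ++ [e]) d = pvC es d + (if pvDr e = d then 1 else 0) := by
  by_cases h : pvDr e = d <;> simp [pvC, List.filter_append, List.filter_cons, h]

theorem pvC_eq_zero_of_not_mem (es : List (List (String × Int))) (d : Int)
    (hd : 0 ≤ d ∧ d ≤ 14) (h : d ∉ pvVDays es) : pvC es d = 0 ∧ pvS es d = 0 := by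
  have : es.filter (fun e => pvDr e == d) = [] := by
    rw [List.filter_eq_nil_iff]
    intro e he hbe
    exact h (by
      simp [pvVDays, List.mem_filter]
      exact ⟨⟨e, he, by simpa using hbe⟩, by omega⟩)
  simp [pvC, pvS, this]

theorem pvMem_vdays_range (es : List (List (String × Int))) (d : Int)
    (h : d ∈ pvVDays es) : 0 ≤ d ∧ d ≤ 14 := by
  simp [pvVDays, List.mem_filter] at h
  omega

-- building the ordered dedup one element at a time
theorem pvDedup_append (xs : List Int) (x : Int) :
    PySem.List.dedup (xs ++ [x]) =
      if x ∈ xs then PySem.List.dedup xs else PySem.List.dedup xs ++ [x] := by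
  simp only [PySem.List.dedup_eq_ofList, PySem.Set.ofList_eq_foldl, List.foldl_append,
    List.foldl_cons, List.foldl_nil]
  have hmem : (x ∈ PySem.Set.ofList xs) ↔ x ∈ xs := PySem.Set.mem_ofList xs x
  rw [PySem.Set.ofList_eq_foldl] at hmem
  by_cases h : x ∈ xs
  · simp [PySem.Set.add, PySem.Set.contains, List.elem_iff, hmem.mpr h, h]
  · simp [PySem.Set.add, PySem.Set.contains, List.elem_iff, hmem, h]

theorem pvAStep_invalid (pbd : PySem.Dict Int (PySem.Dict String Int))
    (e : List (String × Int)) (h : ¬ (0 ≤ pvDr e ∧ pvDr e ≤ 14)) : pvAStep pbd e = pbd := by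
  unfold pvAStep
  exact if_neg h

theorem pvAStep_valid (pbd : PySem.Dict Int (PySem.Dict String Int))
    (e : List (String × Int)) (h : 0 ≤ pvDr e ∧ pvDr e ≤ 14) :
    pvAStep pbd e =
      ((if ¬ pbd.contains (pvDr e) then pbd.insert (pvDr e) (pvEntry (pvDr e) 0 0)
        else pbd).modify (pvDr e) (PySem.Dict.mk [])
          (fun v => v.modify "amount" 0 (· + pvEa e))).modify (pvDr e) (PySem.Dict.mk [])
          (fun v => v.modify "count" 0 (· + 1)) := by
  unfold pvAStep
  exact if_pos h

-- keys are unchanged by modifying a present key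
theorem pvKeys_modify_of_contains {d : PySem.Dict Int (PySem.Dict String Int)} {k : Int}
    (d0 : PySem.Dict String Int) (f : PySem.Dict String Int → PySem.Dict String Int)
    (h : d.contains k = true) : (d.modify k d0 f).keys = d.keys := by
  rw [PySem.Dict.keys_modify, PySem.Dict.keys_insert_of_contains _ _ h]

theorem pvContains_modify_self (d : PySem.Dict Int (PySem.Dict String Int)) (k : Int)
    (d0 : PySem.Dict String Int) (f : PySem.Dict String Int → PySem.Dict String Int) :
    (d.modify k d0 f).contains k = true := by
  rw [PySem.Dict.contains_modify]; simp

-- characterisation of A's dict after the fold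
theorem pvAfold_char (es : List (List (String × Int))) :
    (es.foldl pvAStep PySem.Dict.empty).keys = PySem.List.dedup (pvVDays es) ∧
    ∀ d ∈ pvVDays es,
      (es.foldl pvAStep PySem.Dict.empty).getD d (PySem.Dict.mk []) =
        pvEntry d (pvS es d) (pvC es d) := by
  induction es using List.reverseRecOn with
  | nil => simp [pvVDays, PySem.List.dedup, PySem.Dict.keys_empty]
  | append_singleton es e ih =>
    obtain ⟨hkeys, hget⟩ := ih
    rw [List.foldl_append, List.foldl_cons, List.foldl_nil]
    by_cases h : 0 ≤ pvDr e ∧ pvDr e ≤ 14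
    · rw [pvAStep_valid _ _ h, pvVDays_append, if_pos h]
      have hcont : ((es.foldl pvAStep PySem.Dict.empty).contains (pvDr e) = true)
          ↔ pvDr e ∈ pvVDays es := by
        rw [PySem.Dict.contains_iff_mem_keys, hkeys, PySem.List.mem_dedup]
      by_cases hm : pvDr e ∈ pvVDays es
      · rw [if_neg (not_not_intro (hcont.mpr hm))]
        constructor
        · rw [pvKeys_modify_of_contains _ _ (pvContains_modify_self _ _ _ _),
            pvKeys_modify_of_contains _ _ (hcont.mpr hm), hkeys, pvDedup_append,
            if_pos hm]
        · intro d hd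
          by_cases hdd : d = pvDr e
          · subst hdd
            rw [PySem.Dict.getD_modify_self, PySem.Dict.getD_modify_self, hget _ hm,
              pvEntry_modify_amount, pvEntry_modify_count, pvS_append, pvC_append,
              if_pos rfl, if_pos rfl]
          · rw [PySem.Dict.getD_modify_of_ne _ _ _ hdd, PySem.Dict.getD_modify_of_ne _ _ _ hdd,
              pvS_append, pvC_append, if_neg (fun hh => hdd hh.symm),
              if_neg (fun hh => hdd hh.symm), add_zero, add_zero]
            have hd' : d ∈ pvVDays es := by
              rcases List.mem_append.mp hd with h' | h'
              · exact h'
              · simp at h'; exact absurd h' hdd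
            exact hget d hd'
      · have hcf : (es.foldl pvAStep PySem.Dict.empty).contains (pvDr e) = false := by
          cases hcb : (es.foldl pvAStep PySem.Dict.empty).contains (pvDr e)
          · rfl
          · exact absurd (hcont.mp hcb) hm
        rw [if_pos (fun hc => hm (hcont.mp hc))]
        constructor
        · rw [pvKeys_modify_of_contains _ _ (pvContains_modify_self _ _ _ _),
            pvKeys_modify_of_contains _ _ (PySem.Dict.contains_insert_self _ _ _),
            PySem.Dict.keys_insert_of_not_contains _ _ hcf, hkeys, pvDedup_append,
            if_neg hm]
        · intro d hd
          by_cases hdd : d = pvDr e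
          · subst hdd
            obtain ⟨hc0, hs0⟩ := pvC_eq_zero_of_not_mem es _ h hm
            rw [PySem.Dict.getD_modify_self, PySem.Dict.getD_modify_self,
              PySem.Dict.getD_insert_self, pvS_append, pvC_append,
              if_pos rfl, if_pos rfl, hs0, hc0]
            rfl
          · rw [PySem.Dict.getD_modify_of_ne _ _ _ hdd, PySem.Dict.getD_modify_of_ne _ _ _ hdd,
              PySem.Dict.getD_insert_of_ne _ _ _ hdd, pvS_append, pvC_append,
              if_neg (fun hh => hdd hh.symm), if_neg (fun hh => hdd hh.symm),
              add_zero, add_zero]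
            have hd' : d ∈ pvVDays es := by
              rcases List.mem_append.mp hd with h' | h'
              · exact h'
              · simp at h'; exact absurd h' hdd
            exact hget d hd'
    · rw [pvAStep_invalid _ _ h, pvVDays_append, if_neg h, List.append_nil]
      refine ⟨hkeys, fun d hd => ?_⟩
      have hne : pvDr e ≠ d := fun hq => h (hq ▸ pvMem_vdays_range es d hd)
      rw [pvS_append, pvC_append, if_neg hne, if_neg hne, add_zero, add_zero]
      exact hget d hd

theorem pvBInner_eq (d : Int) (ac : Int × Int) (e : List (String × Int)) :
    pvBInner d ac e = if pvDr e = d then (ac.1 + pvEa e, ac.2 + 1) else ac := rfl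

theorem pvBInner_fold (es : List (List (String × Int))) (d : Int) :
    ∀ a c : Int, es.foldl (pvBInner d) (a, c) = (a + pvS es d, c + pvC es d) := by
  induction es with
  | nil => simp [pvS, pvC]
  | cons e es ih =>
    intro a c
    rw [List.foldl_cons, pvBInner_eq]
    by_cases h : pvDr e = d
    · have hs : pvS (e :: es) d = pvEa e + pvS es d := by
        simp [pvS, List.filter_cons, h]
      have hc : pvC (e :: es) d = 1 + pvC es d := by
        simp [pvC, List.filter_cons, h]; omega
      rw [if_pos h]
      rw [ih]
      rw [hs, hc]
      simp only [Prod.mk.injEq]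
      constructor <;> ring
    · have hs : pvS (e :: es) d = pvS es d := by simp [pvS, List.filter_cons, h]
      have hc : pvC (e :: es) d = pvC es d := by simp [pvC, List.filter_cons, h]
      rw [if_neg h, ih, hs, hc]

-- a day has a bucket iff some event carries it
theorem pvC_ne_zero_iff (es : List (List (String × Int))) (d : Int)
    (hd : 0 ≤ d ∧ d ≤ 14) : pvC es d ≠ 0 ↔ d ∈ pvVDays es := by
  constructor
  · intro hne
    have : es.filter (fun e => pvDr e == d) ≠ [] := by
      intro hnil; rw [pvC, hnil] at hne; simp at hne
    obtain ⟨x, hx⟩ := List.exists_mem_of_ne_nil _ this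
    have := List.mem_filter.mp hx
    simp [pvVDays, List.mem_filter]
    exact ⟨⟨x, this.1, by simpa using this.2⟩, by omega⟩
  · intro hmem hzero
    simp [pvVDays, List.mem_filter] at hmem
    obtain ⟨⟨x, hx, hdx⟩, _⟩ := hmem
    have : x ∈ es.filter (fun e => pvDr e == d) := List.mem_filter.mpr ⟨hx, by simp [hdx]⟩
    rw [pvC] at hzero
    have := List.length_pos_of_mem this
    omega

theorem pv_main (es : List (List (String × Int))) :
    calculate_selling_pressure_timeline es = calculate_selling_pressure_timeline_alt es := by
  obtain ⟨hkeys, hget⟩ := pvAfold_char es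
  have hnd : (es.foldl pvAStep PySem.Dict.empty).keys.Nodup := by
    rw [hkeys]; exact PySem.List.nodup_dedup _
  -- A's dict values, written out
  have hvals : (es.foldl pvAStep PySem.Dict.empty).values =
      (PySem.List.dedup (pvVDays es)).map (fun d => pvEntry d (pvS es d) (pvC es d)) := by
    rw [PySem.Dict.values_eq_map_keys _ hnd (PySem.Dict.mk []), hkeys]
    exact List.map_congr_left (fun d hd =>
      hget d ((PySem.List.mem_dedup _ _).mp hd))
  -- the ascending-day enumeration of the same buckets
  set Dfil := (PySem.List.pyRange 0 15 1).filter (fun d => decide (d ∈ pvVDays es)) with hDfil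
  have hperm : (Dfil.map (fun d => pvEntry d (pvS es d) (pvC es d))).Perm
      ((PySem.List.dedup (pvVDays es)).map (fun d => pvEntry d (pvS es d) (pvC es d))) := by
    refine List.Perm.map _ ?_
    rw [List.perm_ext_iff_of_nodup
      ((PySem.List.nodup_pyRange_one 0 15).filter _) (PySem.List.nodup_dedup _)]
    intro d
    rw [PySem.List.mem_dedup, List.mem_filter]
    constructor
    · rintro ⟨-, hd⟩; simpa using hd
    · intro hd
      have := pvMem_vdays_range es d hd
      exact ⟨PySem.List.mem_pyRange_one.mpr ⟨this.1, by omega⟩, by simpa using hd⟩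
  have hpair : (Dfil.map (fun d => pvEntry d (pvS es d) (pvC es d))).Pairwise
      (fun a b => PySem.Dict.getD a "day" 0 < PySem.Dict.getD b "day" 0) := by
    rw [List.pairwise_map]
    simp only [pvEntry_getD_day]
    exact (PySem.List.pairwise_lt_pyRange_one 0 15).filter _
  have hsorted : PySem.List.sorted (es.foldl pvAStep PySem.Dict.empty).values
      (fun x => PySem.Dict.getD x "day" 0) =
      Dfil.map (fun d => pvEntry d (pvS es d) (pvC es d)) := by
    rw [hvals]
    exact PySem.List.sorted_eq_of_perm_of_pairwise_lt _ _ _ hperm hpair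
  -- assemble A's side
  unfold calculate_selling_pressure_timeline
  show (PySem.List.sorted (es.foldl pvAStep PySem.Dict.empty).values
      (fun x => PySem.Dict.getD x "day" 0)).map (fun v => v.items) = _
  rw [hsorted, List.map_map]
  -- assemble B's side
  unfold calculate_selling_pressure_timeline_alt
  have hf : (fun (timeline : List (List (String × Int))) (day : Int) =>
        let ac := es.foldl (pvBInner day) ((0 : Int), (0 : Int))
        if ac.2 ≠ 0 then timeline ++ [[("day", day), ("amount", ac.1), ("count", ac.2)]]
        else timeline) =
      (fun timeline day =>
        if (fun day => decide (pvC es day ≠ 0)) day = true then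
          timeline ++ [(fun day => [("day", day), ("amount", pvS es day),
            ("count", pvC es day)]) day]
        else timeline) := by
    funext timeline day
    simp only [pvBInner_fold, zero_add, decide_eq_true_eq]
  rw [hf, PySem.List.foldl_append_if, List.nil_append]
  -- the two filters select the same days
  have hfe : (PySem.List.pyRange 0 15 1).filter (fun day => decide (pvC es day ≠ 0)) =
      Dfil := by
    rw [hDfil]
    refine List.filter_congr (fun d hd => ?_)
    have hb := PySem.List.mem_pyRange_one.mp hd
    simp only [decide_eq_decide]
    exact pvC_ne_zero_iff es d ⟨hb.1, by omega⟩
  rw [hfe]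
  rfl

-- ===== VERDICT (by name: the statement is the Claim_ definition above) =====
theorem calculate_selling_pressure_timeline_spec : Claim_equal_calculate_selling_pressure_timeline := by
  intro es _
  exact pv_main es
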